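-- pv_equiv track=rewrite | github.com/zhangfeng406/PictureHuaRongDao | 原型设计实现代码/图片华容道/main.py | inverseNum
-- ===== SOURCE A (Python) =====
-- def inverseNum(nums):
--     count = 0
--     for i in range(len(nums)):
--         if nums[i] != 0:
--             for j in range(i):
--                 if nums[j] > nums[i]:
--                     count += 1
--     return count
-- ===== SOURCE B (Python) =====
-- def inverseNum(nums):
--     # merge-sort inversion count, adding only pairs whose right element is nonzero
--     def sortcount(a):
--         if len(a) < 2:
--             return a, 0
--         mid = len(a) // 2
--         left, cl = sortcount(a[:mid])
--         right, cr = sortcount(a[mid:])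
--         merged = []
--         c = cl + cr
--         i = j = 0
--         while i < len(left) and j < len(right):
--             if left[i] <= right[j]:
--                 merged.append(left[i])
--                 i += 1
--             else:
--                 if right[j] != 0:
--                     c += len(left) - i
--                 merged.append(right[j])
--                 j += 1
--         merged.extend(left[i:])
--         merged.extend(right[j:])
--         return merged, c
--     return sortcount(nums)[1]
-- ===== Notes on version B (the rewrite author's own statement) =====
-- stated objective: faster
-- what changed: replaced the quadratic nested index scan by a merge-sort inversion count that adds cross-inversions during the merge, skipping pairs whose right element is zero
import Mathlib
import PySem

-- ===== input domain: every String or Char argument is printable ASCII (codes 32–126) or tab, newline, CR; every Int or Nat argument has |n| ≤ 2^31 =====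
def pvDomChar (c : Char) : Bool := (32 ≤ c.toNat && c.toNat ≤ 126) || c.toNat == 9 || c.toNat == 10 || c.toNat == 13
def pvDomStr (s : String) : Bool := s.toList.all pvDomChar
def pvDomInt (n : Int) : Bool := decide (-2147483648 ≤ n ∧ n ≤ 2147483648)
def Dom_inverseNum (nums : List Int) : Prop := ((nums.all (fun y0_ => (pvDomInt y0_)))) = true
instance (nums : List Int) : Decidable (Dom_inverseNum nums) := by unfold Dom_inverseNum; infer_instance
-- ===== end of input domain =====

-- B replaces A's quadratic nested scan by a merge-sort inversion count (asymptotically faster).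

-- ===== PORT A =====
def inverseNum (nums : List Int) : Int :=
  (PySem.List.pyRange 0 (nums.length : Int) 1).foldl
    (fun count i =>
      if PySem.List.pyGetD nums i 0 ≠ 0 then
        (PySem.List.pyRange 0 i 1).foldl
          (fun c j => if PySem.List.pyGetD nums j 0 > PySem.List.pyGetD nums i 0 then c + 1 else c) count
      else count) 0

-- ===== PORT B =====
-- the while-merge of Source B: returns (merged list, count added during the merge)
def pvMerge : List Int → List Int → List Int × Int
  | [], r => (r, 0)
  | a :: l, [] => (a :: l, 0)
  | a :: l, b :: r =>
    if a ≤ b then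
      let p := pvMerge l (b :: r)
      (a :: p.1, p.2)
    else
      let p := pvMerge (a :: l) r
      (b :: p.1, if b ≠ 0 then p.2 + ((l.length : Int) + 1) else p.2)

-- sortcount of Source B
def pvSortCount (a : List Int) : List Int × Int :=
  if a.length < 2 then (a, 0)
  else
    let mid := a.length / 2
    let pl := pvSortCount (a.take mid)
    let pr := pvSortCount (a.drop mid)
    let pm := pvMerge pl.1 pr.1
    (pm.1, pl.2 + pr.2 + pm.2)
termination_by a.length
decreasing_by
  · simp [List.length_take]; omega
  · simp [List.length_drop]; omega

def inverseNum_alt (nums : List Int) : Int := (pvSortCount nums).2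

-- ===== PRECONDITION & SPEC =====
def Spec_inverseNum (nums : List Int) (out : Int) : Prop := out = inverseNum_alt nums
instance (nums : List Int) (out : Int) : Decidable (Spec_inverseNum nums out) := by unfold Spec_inverseNum; infer_instance

-- ===== CLAIM (what is proved, stated in full; the proofs are below) =====
def Claim_equal_inverseNum : Prop := ∀ (nums : List Int), Dom_inverseNum nums → Spec_inverseNum nums (inverseNum nums)

-- ===== LEMMAS AND PROOFS =====

-- number of elements of l strictly greater than y
def pvGT (l : List Int) (y : Int) : Int := (l.countP (fun a => decide (y < a)) : Int)

-- cross-inversion count between a left block l and a right block r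
def pvCross (l r : List Int) : Int := (r.map (fun y => if y = 0 then 0 else pvGT l y)).sum

-- the pair count, recursing on the leftmost element
def pvS : List Int → Int
  | [] => 0
  | x :: t => (t.countP (fun y => decide (y ≠ 0 ∧ y < x)) : Int) + pvS t

theorem pvCross_nil_left (r : List Int) : pvCross [] r = 0 := by
  simp [pvCross, pvGT]

theorem pvCross_cons_left (x : Int) (l r : List Int) :
    pvCross (x :: l) r = (r.countP (fun y => decide (y ≠ 0 ∧ y < x)) : Int) + pvCross l r := by
  induction r with
  | nil => simp [pvCross]
  | cons y r ih =>
    simp only [pvCross, List.map_cons, List.sum_cons, List.countP_cons] at *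
    by_cases hy : y = 0
    · simp [hy] at *; omega
    · by_cases hlt : y < x
      · simp [hy, hlt, pvGT, List.countP_cons] at *; push_cast; omega
      · simp [hy, hlt, pvGT, List.countP_cons] at *; omega

theorem pvCross_perm_left {l l' : List Int} (h : l.Perm l') (r : List Int) :
    pvCross l r = pvCross l' r := by
  unfold pvCross pvGT
  congr 1
  exact List.map_congr_left (fun y _ => by rw [h.countP_eq])

theorem pvCross_perm_right (l : List Int) {r r' : List Int} (h : r.Perm r') :
    pvCross l r = pvCross l r' := (h.map _).sum_eq

theorem pvS_append (l r : List Int) : pvS (l ++ r) = pvS l + pvS r + pvCross l r := by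
  induction l with
  | nil => simp [pvS, pvCross_nil_left]
  | cons x l ih =>
    simp only [List.cons_append, pvS, List.countP_append, ih, pvCross_cons_left]
    push_cast; ring

theorem pvMerge_perm : ∀ l r : List Int, (pvMerge l r).1.Perm (l ++ r) := by
  intro l r
  fun_induction pvMerge l r with
  | case1 r => simp
  | case2 a l => simp
  | case3 a l b r h p ih =>
    simpa [p] using ih.cons a
  | case4 a l b r h p ih =>
    refine List.Perm.trans (ih.cons b) ?_
    exact (List.perm_middle.symm.trans (by simp))

theorem pvMerge_sorted : ∀ l r : List Int, l.Pairwise (· ≤ ·) → r.Pairwise (· ≤ ·) →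
    (pvMerge l r).1.Pairwise (· ≤ ·) := by
  intro l r
  fun_induction pvMerge l r with
  | case1 r => intro _ hr; simpa using hr
  | case2 a l => intro hl _; simpa using hl
  | case3 a l b r h p ih =>
    intro hl hr
    have hperm := pvMerge_perm l (b :: r)
    refine List.Pairwise.cons ?_ (ih (List.Pairwise.of_cons hl) hr)
    intro y hy
    have := hperm.mem_iff.mp hy
    rcases List.mem_append.mp this with h1 | h2
    · exact List.rel_of_pairwise_cons hl h1
    · rcases List.mem_cons.mp h2 with rfl | h3
      · exact h
      · exact le_trans h (List.rel_of_pairwise_cons hr h3)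
  | case4 a l b r h p ih =>
    intro hl hr
    have hperm := pvMerge_perm (a :: l) r
    refine List.Pairwise.cons ?_ (ih hl (List.Pairwise.of_cons hr))
    intro y hy
    have := hperm.mem_iff.mp hy
    rcases List.mem_append.mp this with h1 | h2
    · rcases List.mem_cons.mp h1 with rfl | h3
      · omega
      · exact le_trans (by omega) (List.rel_of_pairwise_cons hl h3)
    · exact List.rel_of_pairwise_cons hr h2

theorem pvMerge_count : ∀ l r : List Int, l.Pairwise (· ≤ ·) → r.Pairwise (· ≤ ·) →
    (pvMerge l r).2 = pvCross l r := by
  intro l r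
  fun_induction pvMerge l r with
  | case1 r => intro _ _; simp [pvCross_nil_left]
  | case2 a l => intro _ _; simp [pvCross]
  | case3 a l b r h p ih =>
    intro hl hr
    have hrec := ih (List.Pairwise.of_cons hl) hr
    simp only [p] at hrec ⊢
    rw [hrec]
    -- cross (a::l) (b::r) = cross l (b::r) since every y in b::r satisfies a ≤ y
    unfold pvCross
    congr 1
    refine List.map_congr_left (fun y hy => ?_)
    by_cases hy0 : y = 0
    · simp [hy0]
    · have hay : a ≤ y := by
        rcases List.mem_cons.mp hy with rfl | h3
        · exact h
        · exact le_trans h (List.rel_of_pairwise_cons hr h3)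
      simp only [hy0, pvGT, List.countP_cons]
      have : ¬ y < a := by omega
      simp [this]
  | case4 a l b r h p ih =>
    intro hl hr
    have hrec := ih hl (List.Pairwise.of_cons hr)
    simp only [p] at hrec ⊢
    rw [hrec]
    have hall : ∀ z ∈ a :: l, b < z := by
      intro z hz
      rcases List.mem_cons.mp hz with rfl | h3
      · omega
      · exact lt_of_lt_of_le (by omega) (List.rel_of_pairwise_cons hl h3)
    have hcnt : pvGT (a :: l) b = (l.length : Int) + 1 := by
      unfold pvGT
      rw [List.countP_eq_length.mpr (fun z hz => by simpa using hall z hz)]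
      simp
    by_cases hb : b = 0
    · simp [hb, pvCross, pvGT]
    · simp only [pvCross, List.map_cons, List.sum_cons, hb, hcnt]
      simp [hb]
      omega

theorem pvSortCount_spec : ∀ a : List Int,
    (pvSortCount a).1.Perm a ∧ (pvSortCount a).1.Pairwise (· ≤ ·) ∧ (pvSortCount a).2 = pvS a := by
  intro a
  fun_induction pvSortCount a with
  | case1 a h =>
    rcases a with _ | ⟨x, _ | ⟨y, t⟩⟩
    · simp [pvS]
    · simp [pvS]
    · simp at h
  | case2 a h mid pl pr pm hpl hpr =>
    obtain ⟨hp1, hs1, hc1⟩ := hpl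
    obtain ⟨hp2, hs2, hc2⟩ := hpr
    have hmp := pvMerge_perm pl.1 pr.1
    have hperm : pm.1.Perm a := by
      have : (pl.1 ++ pr.1).Perm (a.take mid ++ a.drop mid) := List.Perm.append hp1 hp2
      simpa [pm, List.take_append_drop] using hmp.trans this
    refine ⟨hperm, by simpa [pm] using pvMerge_sorted pl.1 pr.1 hs1 hs2, ?_⟩
    have hcnt : pm.2 = pvCross pl.1 pr.1 := pvMerge_count pl.1 pr.1 hs1 hs2
    have : pvCross pl.1 pr.1 = pvCross (a.take mid) (a.drop mid) := by
      rw [pvCross_perm_left hp1, pvCross_perm_right _ hp2]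
    have hS : pvS a = pvS (a.take mid) + pvS (a.drop mid) + pvCross (a.take mid) (a.drop mid) := by
      conv_lhs => rw [← List.take_append_drop mid a]
      exact pvS_append _ _
    have e1 : pl.2 = pvS (a.take mid) := hc1
    have e2 : pr.2 = pvS (a.drop mid) := hc2
    have e3 : pm.2 = pvCross pl.1 pr.1 := hcnt
    rw [e1, e2, e3, this, hS]

-- ---------- A side ----------

-- per-index contribution of A's outer loop
def pvGA (nums : List Int) (i : Int) : Int :=
  if PySem.List.pyGetD nums i 0 ≠ 0 then
    ((PySem.List.pyRange 0 i 1).countP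
      (fun j => decide (PySem.List.pyGetD nums j 0 > PySem.List.pyGetD nums i 0)) : Int)
  else 0

theorem inverseNum_eq_sum (nums : List Int) :
    inverseNum nums = ((PySem.List.pyRange 0 (nums.length : Int) 1).map (pvGA nums)).sum := by
  have hbody : ∀ (acc i : Int), i ∈ PySem.List.pyRange 0 (nums.length : Int) 1 →
      (if PySem.List.pyGetD nums i 0 ≠ 0 then
        (PySem.List.pyRange 0 i 1).foldl
          (fun c j => if PySem.List.pyGetD nums j 0 > PySem.List.pyGetD nums i 0 then c + 1 else c) acc
      else acc) = acc + pvGA nums i := by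
    intro acc i _
    unfold pvGA
    by_cases h : PySem.List.pyGetD nums i 0 ≠ 0
    · simp only [if_pos h]
      rw [PySem.List.foldl_ite_add_one]
    · simp [h]
  unfold inverseNum
  refine (PySem.List.foldl_congr_mem _ _ _ _ hbody).trans ?_
  rw [PySem.List.foldl_add]
  simp

theorem countP_pyRange_take (nums : List Int) (x : Int) (k : Nat) (hk : k ≤ nums.length) :
    (PySem.List.pyRange 0 (k : Int) 1).countP
      (fun j => decide (PySem.List.pyGetD nums j 0 > x))
      = (nums.take k).countP (fun a => decide (x < a)) := by
  induction k with
  | zero => simp [PySem.List.pyRange_zero_nat]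
  | succ k ih =>
    have hk' : k ≤ nums.length := Nat.le_of_succ_le hk
    have hrange : PySem.List.pyRange 0 ((k : Int) + 1) 1
        = PySem.List.pyRange 0 (k : Int) 1 ++ [(k : Int)] :=
      PySem.List.pyRange_one_succ_right (by positivity)
    have hkl : k < nums.length := hk
    have htake : nums.take (k + 1) = nums.take k ++ [nums[k]] :=
      List.take_succ_eq_append_getElem hkl
    have hget : PySem.List.pyGetD nums (k : Int) 0 = nums[k] := by
      rw [PySem.List.pyGetD_natCast]
      exact List.getD_eq_getElem _ _ hkl
    push_cast
    rw [hrange, htake, List.countP_append, List.countP_append, ih hk']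
    simp [hget]

theorem pvGA_eq (nums : List Int) (k : Nat) (hk : k < nums.length) :
    pvGA nums (k : Int)
      = if nums[k] = 0 then 0 else pvGT (nums.take k) nums[k] := by
  have hget : PySem.List.pyGetD nums (k : Int) 0 = nums[k] := by
    rw [PySem.List.pyGetD_natCast]
    exact List.getD_eq_getElem _ _ hk
  unfold pvGA
  rw [hget]
  by_cases h : nums[k] = 0
  · simp [h]
  · simp only [h, if_neg, ne_eq, not_false_eq_true, if_pos]
    rw [countP_pyRange_take nums nums[k] k (Nat.le_of_lt hk)]
    rfl

theorem inverseNum_append (xs : List Int) (x : Int) :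
    inverseNum (xs ++ [x]) = inverseNum xs + (if x = 0 then 0 else pvGT xs x) := by
  rw [inverseNum_eq_sum, inverseNum_eq_sum]
  have hlen : ((xs ++ [x]).length : Int) = (xs.length : Int) + 1 := by simp
  rw [hlen, PySem.List.pyRange_one_succ_right (by positivity), List.map_append, List.sum_append]
  congr 1
  · congr 1
    refine List.map_congr_left (fun i hi => ?_)
    have hmem := (PySem.List.mem_pyRange_one).mp hi
    obtain ⟨h0, hlt⟩ := hmem
    obtain ⟨k, rfl⟩ := Int.eq_ofNat_of_zero_le h0
    have hk : k < xs.length := by exact_mod_cast hlt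
    have hk' : k < (xs ++ [x]).length := by simp; omega
    rw [pvGA_eq _ k hk', pvGA_eq _ k hk]
    have hgel : (xs ++ [x])[k] = xs[k] := List.getElem_append_left hk
    have htk : (xs ++ [x]).take k = xs.take k := by
      rw [List.take_append_of_le_length (Nat.le_of_lt hk)]
    rw [hgel, htk]
  · have hk' : xs.length < (xs ++ [x]).length := by simp
    have : ((xs.length : Int)) = ((xs.length : Nat) : Int) := rfl
    rw [List.map_singleton, List.sum_singleton, pvGA_eq _ xs.length hk']
    have hgel : (xs ++ [x])[xs.length] = x := by simp
    have htk : (xs ++ [x]).take xs.length = xs := by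
      simp
    rw [hgel, htk]

theorem pvS_append_singleton (xs : List Int) (x : Int) :
    pvS (xs ++ [x]) = pvS xs + (if x = 0 then 0 else pvGT xs x) := by
  rw [pvS_append]
  have : pvS [x] = 0 := by simp [pvS]
  rw [this]
  simp [pvCross]

theorem inverseNum_eq_pvS (xs : List Int) : inverseNum xs = pvS xs := by
  induction xs using List.reverseRecOn with
  | nil => simp [inverseNum, pvS]
  | append_singleton xs x ih =>
    rw [inverseNum_append, pvS_append_singleton, ih]

-- ===== VERDICT (by name: the statement is the Claim_ definition above) =====
theorem inverseNum_spec : Claim_equal_inverseNum := by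
  intro nums _
  unfold Spec_inverseNum inverseNum_alt
  rw [inverseNum_eq_pvS, (pvSortCount_spec nums).2.2]
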